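-- pv_equiv track=rewrite | github.com/amberg710/visitor_delivery_demo- | app.py | yearly_counts
-- ===== SOURCE A (Python) =====
-- def yearly_counts(visitors: list[dict]) -> dict[str, int]:
--     counts = {}
--     for v in visitors:
--         date_str = v.get("Date", "").strip()
--         if len(date_str) >= 4:
--             key = date_str[:4]
--             counts[key] = counts.get(key, 0) + 1
--     return dict(sorted(counts.items(), reverse=True))
-- ===== SOURCE B (Python) =====
-- from itertools import groupby
--
--
-- def yearly_counts(visitors: list[dict]) -> dict[str, int]:
--     years = []
--     for v in visitors:
--         d = v.get("Date", "").strip()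
--         if len(d) >= 4:
--             years.append(d[:4])
--     years.sort(reverse=True)
--     return dict((y, len(list(g))) for y, g in groupby(years))
-- ===== Notes on version B (the rewrite author's own statement) =====
-- stated objective: alternative
-- what changed: Replaces the hash-aggregate (dict counting while iterating, then sorting the items) by sort-then-group: collect the valid 4-char year keys into a flat list, sort it descending, and emit one (year, run-length) pair per itertools.groupby run.
import Mathlib
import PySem

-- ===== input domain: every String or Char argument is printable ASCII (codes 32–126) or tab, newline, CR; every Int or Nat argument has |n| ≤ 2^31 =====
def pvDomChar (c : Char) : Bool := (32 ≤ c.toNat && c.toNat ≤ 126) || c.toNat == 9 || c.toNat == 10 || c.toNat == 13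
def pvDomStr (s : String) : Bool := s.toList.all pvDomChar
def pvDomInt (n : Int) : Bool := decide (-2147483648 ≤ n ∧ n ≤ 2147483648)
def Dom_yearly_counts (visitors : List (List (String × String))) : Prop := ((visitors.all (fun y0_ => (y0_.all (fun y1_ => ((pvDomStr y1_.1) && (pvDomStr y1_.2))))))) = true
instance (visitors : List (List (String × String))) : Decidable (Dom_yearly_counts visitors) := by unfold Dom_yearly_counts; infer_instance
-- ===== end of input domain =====

-- B replaces A's hash-aggregate (count into a dict, then sort the items) by sort-then-group
-- over the flat list of year keys; same result, similar cost (objective: alternative).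

-- ===== PORT A =====
def yearly_counts (visitors : List (List (String × String))) : List (String × Int) :=
  let counts := visitors.foldl (fun counts v =>
    let date_str := PySem.Str.strip ((PySem.Dict.ofList v).getD "Date" "")
    if 4 ≤ PySem.Str.len date_str then
      let key := PySem.Str.slice date_str none (some 4)
      counts.insert key (counts.getD key 0 + 1)
    else counts) PySem.Dict.empty
  PySem.List.sorted2 counts.items Prod.fst Prod.snd true

-- ===== PORT B =====
-- one (year, run-length) pair per run of equal keys (itertools.groupby over the sorted list)
def groupRuns : List String → List (String × Int)
  | [] => []
  | y :: rest =>
      (y, 1 + (rest.takeWhile (· == y)).length) :: groupRuns (rest.dropWhile (· == y))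
  termination_by l => l.length
  decreasing_by
    exact Nat.lt_succ_of_le ((List.dropWhile_sublist (l := rest) (· == y)).length_le)

def yearly_counts_alt (visitors : List (List (String × String))) : List (String × Int) :=
  let years := visitors.foldl (fun acc v =>
    let d := PySem.Str.strip ((PySem.Dict.ofList v).getD "Date" "")
    if 4 ≤ PySem.Str.len d then acc ++ [PySem.Str.slice d none (some 4)] else acc) []
  groupRuns (PySem.List.sorted years (fun s => s) true)

-- ===== PRECONDITION & SPEC =====
def Spec_yearly_counts (visitors : List (List (String × String))) (out : List (String × Int)) : Prop := out = yearly_counts_alt visitors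
instance (visitors : List (List (String × String))) (out : List (String × Int)) : Decidable (Spec_yearly_counts visitors out) := by unfold Spec_yearly_counts; infer_instance

-- ===== CLAIM (what is proved, stated in full; the proofs are below) =====
def Claim_equal_yearly_counts : Prop := ∀ (visitors : List (List (String × String))), Dom_yearly_counts visitors → Spec_yearly_counts visitors (yearly_counts visitors)

-- ===== LEMMAS AND PROOFS =====

-- the visitor filter and key extraction shared by the two programs
def pvP (v : List (String × String)) : Bool :=
  4 ≤ PySem.Str.len (PySem.Str.strip ((PySem.Dict.ofList v).getD "Date" ""))
def pvK (v : List (String × String)) : String :=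
  PySem.Str.slice (PySem.Str.strip ((PySem.Dict.ofList v).getD "Date" "")) none (some 4)

lemma dict_fold_eq (vs : List (List (String × String))) :
    ∀ (d : PySem.Dict String Int),
      vs.foldl (fun counts v =>
        let date_str := PySem.Str.strip ((PySem.Dict.ofList v).getD "Date" "")
        if 4 ≤ PySem.Str.len date_str then
          let key := PySem.Str.slice date_str none (some 4)
          counts.insert key (counts.getD key 0 + 1)
        else counts) d
      = ((vs.filter pvP).map pvK).foldl (fun d k => d.insert k (d.getD k 0 + 1)) d := by
  have hbody : (fun (counts : PySem.Dict String Int) v =>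
      let date_str := PySem.Str.strip ((PySem.Dict.ofList v).getD "Date" "")
      if 4 ≤ PySem.Str.len date_str then
        let key := PySem.Str.slice date_str none (some 4)
        counts.insert key (counts.getD key 0 + 1)
      else counts)
    = (fun (counts : PySem.Dict String Int) v =>
        if pvP v then counts.insert (pvK v) (counts.getD (pvK v) 0 + 1) else counts) := by
    funext counts v
    by_cases hc : 4 ≤ PySem.Str.len (PySem.Str.strip ((PySem.Dict.ofList v).getD "Date" ""))
    · simp only [hc, if_true, pvP, pvK, decide_eq_true_eq]
    · simp only [hc, pvP, pvK, decide_eq_true_eq, if_false]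
  rw [hbody]
  induction vs with
  | nil => intro d; rfl
  | cons v vs ih =>
      intro d
      by_cases h : pvP v = true
      · simp only [List.foldl_cons, List.filter_cons, h, if_true, List.map_cons]
        exact ih _
      · have h' : pvP v = false := by simpa using h
        simp only [List.foldl_cons, List.filter_cons, h', Bool.false_eq_true, ite_false]
        exact ih _

lemma years_eq (vs : List (List (String × String))) :
    vs.foldl (fun acc v =>
      let d := PySem.Str.strip ((PySem.Dict.ofList v).getD "Date" "")
      if 4 ≤ PySem.Str.len d then acc ++ [PySem.Str.slice d none (some 4)] else acc) []
    = (vs.filter pvP).map pvK := by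
  simpa [pvP, pvK] using PySem.List.foldl_append_if pvP pvK vs []

lemma insertBy_congr (f g : String × Int → String × Int → Bool) (x : String × Int)
    (ys : List (String × Int)) (h : ∀ b ∈ ys, f x b = g x b) :
    PySem.List.insertBy f x ys = PySem.List.insertBy g x ys := by
  induction ys with
  | nil => rfl
  | cons b ys ih =>
      have hb : f x b = g x b := h b (by simp)
      simp only [PySem.List.insertBy, hb]
      split_ifs with hc
      · rfl
      · rw [ih (fun c hc => h c (by simp [hc]))]

lemma foldl_insertBy_congr (f g : String × Int → String × Int → Bool)
    (xs : List (String × Int)) :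
    ∀ acc, (∀ a b, (a ∈ xs ∨ a ∈ acc) → (b ∈ xs ∨ b ∈ acc) → f a b = g a b) →
    xs.foldl (fun acc x => PySem.List.insertBy f x acc) acc
      = xs.foldl (fun acc x => PySem.List.insertBy g x acc) acc := by
  induction xs with
  | nil => intro acc _; rfl
  | cons x xs ih =>
      intro acc h
      simp only [List.foldl_cons]
      rw [insertBy_congr f g x acc (fun b hb => h x b (Or.inl (by simp)) (Or.inr hb))]
      exact ih _ (fun a b ha hb => by
        apply h a b
        · rcases ha with ha | ha
          · exact Or.inl (by simp [ha])
          · rcases (PySem.List.mem_insertBy g x a acc).1 ha with rfl | ha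
            · exact Or.inl (by simp)
            · exact Or.inr ha
        · rcases hb with hb | hb
          · exact Or.inl (by simp [hb])
          · rcases (PySem.List.mem_insertBy g x b acc).1 hb with rfl | hb
            · exact Or.inl (by simp)
            · exact Or.inr hb)

-- on a list with pairwise fst-injective elements, the tuple sort is the fst sort
lemma sorted2_eq_sorted_fst (xs : List (String × Int))
    (h : ∀ a ∈ xs, ∀ b ∈ xs, a.1 = b.1 → a = b) :
    PySem.List.sorted2 xs Prod.fst Prod.snd true = PySem.List.sorted xs Prod.fst true := by
  exact foldl_insertBy_congr
    (fun a b => decide (b.1 < a.1) || (!decide (a.1 < b.1) && decide (b.2 < a.2)))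
    (fun a b => decide (b.1 < a.1)) xs []
    (by
      intro a b ha hb
      simp only [List.not_mem_nil, or_false] at ha hb
      rcases lt_trichotomy b.1 a.1 with hlt | heq | hgt
      · simp [hlt, not_lt.2 (le_of_lt hlt)]
      · have hab : b = a := h b hb a ha heq
        subst hab
        simp
      · simp [not_lt.2 (le_of_lt hgt), hgt])

lemma mem_groupRuns (L : List String) (h : L.Pairwise (fun a b => b ≤ a)) :
    ∀ p : String × Int, p ∈ groupRuns L ↔ p.1 ∈ L ∧ p.2 = (L.count p.1 : Int) := by
  revert h
  induction L using groupRuns.induct with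
  | case1 => intro _ p; simp [groupRuns]
  | case2 y rest ih =>
      intro h p
      have hy : ∀ b ∈ rest, b ≤ y := (List.pairwise_cons.1 h).1
      have hrestPW : rest.Pairwise (fun a b => b ≤ a) := (List.pairwise_cons.1 h).2
      have hrun : ∀ b ∈ rest.takeWhile (· == y), b = y := by
        intro b hb
        simpa using List.mem_takeWhile_imp hb
      have hsplit : rest.takeWhile (· == y) ++ rest.dropWhile (· == y) = rest :=
        List.takeWhile_append_dropWhile
      have hsubl : (rest.dropWhile (· == y)).Sublist rest := List.dropWhile_sublist _
      have hPW' : (rest.dropWhile (· == y)).Pairwise (fun a b => b ≤ a) :=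
        hrestPW.sublist hsubl
      have hynot : y ∉ rest.dropWhile (· == y) := by
        intro hy'
        cases hd : rest.dropWhile (· == y) with
        | nil => rw [hd] at hy'; exact List.not_mem_nil hy'
        | cons a tl =>
            have hne : (a == y) = false := by
              have := List.head_dropWhile_not (· == y) (l := rest) (by simp [hd])
              simpa [hd] using this
            have hne' : a ≠ y := by simpa using hne
            rw [hd] at hy'
            rcases List.mem_cons.1 hy' with rfl | hy''
            · exact hne' rfl
            · rw [hd] at hPW'
              have h1 : y ≤ a := (List.pairwise_cons.1 hPW').1 y hy''
              have h2 : a ≤ y := hy a (hsubl.mem (by rw [hd]; simp))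
              exact hne' (le_antisymm h2 h1)
      have hcounty : (y :: rest).count y = 1 + (rest.takeWhile (· == y)).length := by
        have h1 : (rest.takeWhile (· == y)).count y = (rest.takeWhile (· == y)).length :=
          List.count_eq_length.2 (fun b hb => (hrun b hb).symm)
        have h2 : (rest.dropWhile (· == y)).count y = 0 := List.count_eq_zero.2 hynot
        have h3 : rest.count y
            = (rest.takeWhile (· == y)).count y + (rest.dropWhile (· == y)).count y := by
          conv_lhs => rw [← hsplit]
          exact List.count_append
        rw [List.count_cons_self, h3, h1, h2]
        omega
      have hcountne : ∀ k, k ≠ y → (y :: rest).count k = (rest.dropWhile (· == y)).count k := by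
        intro k hk
        have h1 : (rest.takeWhile (· == y)).count k = 0 :=
          List.count_eq_zero.2 (fun hmem => hk (hrun k hmem))
        have h3 : rest.count k
            = (rest.takeWhile (· == y)).count k + (rest.dropWhile (· == y)).count k := by
          conv_lhs => rw [← hsplit]
          exact List.count_append
        rw [List.count_cons_of_ne (Ne.symm hk), h3, h1]
        omega
      constructor
      · intro hp
        rw [groupRuns] at hp
        rcases List.mem_cons.1 hp with rfl | hp'
        · refine ⟨by simp, ?_⟩
          simp only [hcounty]
          push_cast
          ring
        · obtain ⟨hm, hc⟩ := (ih hPW' p).1 hp'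
          have hne : p.1 ≠ y := fun he => hynot (he ▸ hm)
          exact ⟨List.mem_cons_of_mem _ (hsubl.mem hm), by rw [hcountne p.1 hne]; exact hc⟩
      · rintro ⟨hm, hc⟩
        rw [groupRuns]
        by_cases hk : p.1 = y
        · apply List.mem_cons.2; left
          have : p.2 = (1 : Int) + (rest.takeWhile (· == y)).length := by
            rw [hc, hk, hcounty]; push_cast; ring
          calc p = (p.1, p.2) := rfl
            _ = (y, 1 + ((rest.takeWhile (· == y)).length : Int)) := by rw [hk, this]
        · apply List.mem_cons.2; right
          apply (ih hPW' p).2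
          refine ⟨?_, by rw [hc, hcountne p.1 hk]⟩
          rcases List.mem_cons.1 hm with he | hm'
          · exact absurd he hk
          · rw [← hsplit] at hm'
            rcases List.mem_append.1 hm' with hr | hr
            · exact absurd (hrun _ hr) hk
            · exact hr

lemma pairwise_groupRuns (L : List String) (h : L.Pairwise (fun a b => b ≤ a)) :
    (groupRuns L).Pairwise (fun p q => q.1 < p.1) := by
  revert h
  induction L using groupRuns.induct with
  | case1 => intro _; simp [groupRuns]
  | case2 y rest ih =>
      intro h
      have hy : ∀ b ∈ rest, b ≤ y := (List.pairwise_cons.1 h).1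
      have hsubl : (rest.dropWhile (· == y)).Sublist rest := List.dropWhile_sublist _
      have hPW' : (rest.dropWhile (· == y)).Pairwise (fun a b => b ≤ a) :=
        ((List.pairwise_cons.1 h).2).sublist hsubl
      rw [groupRuns]
      refine List.pairwise_cons.2 ⟨?_, ih hPW'⟩
      intro q hq
      obtain ⟨hm, _⟩ := (mem_groupRuns _ hPW' q).1 hq
      have hle : q.1 ≤ y := hy q.1 (hsubl.mem hm)
      have hne : q.1 ≠ y := by
        intro he
        -- y ∈ dropWhile would make its head y, impossible
        cases hd : rest.dropWhile (· == y) with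
        | nil => rw [hd] at hm; exact List.not_mem_nil hm
        | cons a tl =>
            have hne0 : (a == y) = false := by
              have := List.head_dropWhile_not (· == y) (l := rest) (by simp [hd])
              simpa [hd] using this
            have hne' : a ≠ y := by simpa using hne0
            rw [hd] at hm hPW'
            rcases List.mem_cons.1 hm with rfl | hm'
            · exact hne' he
            · have h1 : q.1 ≤ a := (List.pairwise_cons.1 hPW').1 q.1 hm'
              have h2 : a ≤ y := hy a (hsubl.mem (by rw [hd]; simp))
              exact hne' (le_antisymm h2 (he ▸ h1))
      exact lt_of_le_of_ne hle hne

-- ===== VERDICT (by name: the statement is the Claim_ definition above) =====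
theorem yearly_counts_spec : Claim_equal_yearly_counts := by
  intro visitors _
  unfold Spec_yearly_counts yearly_counts yearly_counts_alt
  rw [dict_fold_eq, years_eq, PySem.Dict.foldl_insert_getD_add_one_eq_counter]
  have hL : (PySem.List.sorted ((visitors.filter pvP).map pvK) (fun s => s) true).Pairwise
      (fun a b => b ≤ a) := by
    simpa using PySem.List.sorted_pairwise_rev ((visitors.filter pvP).map pvK) (fun s => s)
  have hperm : (PySem.List.sorted ((visitors.filter pvP).map pvK) (fun s => s) true).Perm
      ((visitors.filter pvP).map pvK) := PySem.List.sorted_perm _ _ _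
  show PySem.List.sorted2 (PySem.Dict.counter ((visitors.filter pvP).map pvK)).items
      Prod.fst Prod.snd true
    = groupRuns (PySem.List.sorted ((visitors.filter pvP).map pvK) (fun s => s) true)
  rw [PySem.Dict.items_counter]
  set ks := (visitors.filter pvP).map pvK with hks
  set L := PySem.List.sorted ks (fun s => s) true with hLdef
  have hmemitems : ∀ p : String × Int,
      p ∈ (PySem.Set.ofList ks).map (fun k => (k, (ks.count k : Int))) ↔
        p.1 ∈ ks ∧ p.2 = (ks.count p.1 : Int) := by
    intro p
    constructor
    · intro hp
      obtain ⟨k, hk, he⟩ := List.mem_map.1 hp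
      cases he
      exact ⟨(PySem.Set.mem_ofList ks k).1 hk, rfl⟩
    · rintro ⟨h1, h2⟩
      exact List.mem_map.2 ⟨p.1, (PySem.Set.mem_ofList ks p.1).2 h1, by
        rw [← h2]⟩
  rw [sorted2_eq_sorted_fst _ (by
    intro a ha b hb he
    obtain ⟨k, _, rfl⟩ := List.mem_map.1 ha
    obtain ⟨k', _, rfl⟩ := List.mem_map.1 hb
    simp only at he
    subst he
    rfl)]
  apply PySem.List.sorted_rev_eq_of_perm_of_pairwise_gt
  · apply (List.perm_ext_iff_of_nodup ?_ ?_).2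
    · intro p
      rw [mem_groupRuns L hL p, hmemitems p, hperm.mem_iff, hperm.count_eq]
    · exact ((pairwise_groupRuns L hL).imp (fun {a b} hab he => by
        rw [he] at hab; exact lt_irrefl _ hab))
    · exact (PySem.Set.nodup_ofList ks).map
        (fun a b hab => (congrArg Prod.fst hab : a = b))
  · exact pairwise_groupRuns L hL
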